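-- pv_equiv track=rewrite | github.com/meghak423/AllSems_Console | WINGS_AI_Bootcamp/Python/Odometer.py | next_reading
-- ===== SOURCE A (Python) =====
-- def is_valid(n: int) -> bool:
--     if n < 10:
--         return True
--     elif (n // 10) % 10 < n % 10:
--         return is_valid(n // 10)
--     else:
--         return False
--
-- def get_limits(n: int) -> tuple[int, int]:
--     LIMIT = "123456789"
--     size = len(str(n))
--     return int(LIMIT[:size]), int(LIMIT[-size:])
--
-- def next_reading(reading: int) -> int:
--     start, limit = get_limits(reading)
--     if reading == limit:
--         return start
--     reading += 1
--     while not is_valid(reading):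
--         reading += 1
--         if reading > limit:
--             reading = start
--     return reading
-- ===== SOURCE B (Python) =====
-- # All strictly-increasing-digit numbers are digit-subsets of 1..9: precompute the complete
-- # table of them once (in increasing order), then answer each query with a single scan
-- # instead of counting upward one reading at a time.
-- def _extend(v, last, d):
--     if d == 0:
--         return [v]
--     res = []
--     for nxt in range(last + 1, 10):
--         res.extend(_extend(v * 10 + nxt, nxt, d - 1))
--     return res
--
-- _CANDS = [c for d in range(1, 10) for c in _extend(0, 0, d)]
--
-- def next_reading(reading):
--     d = len(str(reading))
--     start = int("123456789"[:d])
--     if reading >= int("123456789"[-d:]):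
--         return start
--     for c in _CANDS:
--         if c > reading:
--             return c
--     return start  # never reached: 123456789 is the largest candidate
-- ===== Notes on version B (the rewrite author's own statement) =====
-- stated objective: faster
-- what changed: Instead of incrementing the reading one by one and re-testing each value with the recursive digit check, B precomputes the complete sorted table of strictly-increasing-digit numbers (digit-subsets of 1..9) once and answers with a single scan for the first table entry above the reading, wrapping to start when the reading is at or past the limit; Pre_ excludes negative readings, which are outside an odometer's domain and on which A's value (reading+1, since its digit check accepts any number below 10) is an accident of its increment loop.
-- outside the precondition, e.g. on next_reading(-5): A returns -4, B returns 1
import Mathlib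
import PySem

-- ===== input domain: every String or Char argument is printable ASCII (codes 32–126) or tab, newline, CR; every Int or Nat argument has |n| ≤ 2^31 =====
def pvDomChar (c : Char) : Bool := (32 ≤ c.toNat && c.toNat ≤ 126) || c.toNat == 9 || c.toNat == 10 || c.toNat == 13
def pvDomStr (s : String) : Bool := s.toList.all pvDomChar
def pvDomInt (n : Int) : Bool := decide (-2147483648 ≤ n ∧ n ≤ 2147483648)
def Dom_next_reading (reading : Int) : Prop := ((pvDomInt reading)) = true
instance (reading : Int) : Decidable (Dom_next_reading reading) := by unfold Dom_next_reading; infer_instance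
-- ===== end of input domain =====

-- B replaces A's unit-step upward search for the next strictly-increasing-digit reading by a
-- table of all such numbers (digit-subsets of 1..9) built once in increasing order and scanned once.


-- ===== PORT A =====
-- is_valid recurses on n // 10; the Nat fuel (|n| + 1 suffices) only makes the recursion
-- structural, it is never exhausted (pvIsValidGo_congr below)
def pvIsValidGo : Nat → Int → Bool
  | 0, _ => true
  | f + 1, n =>
    if n < 10 then true
    else if PySem.Int.mod (PySem.Int.floordiv n 10) 10 < PySem.Int.mod n 10 then
      pvIsValidGo f (PySem.Int.floordiv n 10)
    else false

def is_valid (n : Int) : Bool := pvIsValidGo (n.natAbs + 1) n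

-- int(...) never fails here: both slices of "123456789" are nonempty digit strings (size ≥ 1)
def get_limits (n : Int) : Int × Int :=
  let size := PySem.Str.len (PySem.Int.toStr n)
  ((PySem.Int.ofStr? (PySem.Str.slice "123456789" none (some size))).getD 0,
   (PySem.Int.ofStr? (PySem.Str.slice "123456789" (some (-size)) none)).getD 0)

-- the while-loop of A; the fuel only makes it total, the proof shows it is never exhausted
def pvLoopA (start limit : Int) : Nat → Int → Int
  | 0, r => r
  | fuel+1, r =>
    if is_valid r then r
    else pvLoopA start limit fuel (if limit < r + 1 then start else r + 1)

def next_reading (reading : Int) : Int :=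
  let sl := get_limits reading
  if reading = sl.2 then sl.1
  else pvLoopA sl.1 sl.2 ((sl.2 - reading).toNat + (sl.2 - sl.1).toNat + 3) (reading + 1)

-- ===== PORT B =====
-- _extend recurses on d (a value in 0..9); the Nat fuel (10 suffices) only makes the
-- recursion structural, it is never exhausted
def pvExtend : Nat → Int → Int → Int → List Int
  | 0, v, _, _ => [v]
  | f + 1, v, last, d =>
    if d = 0 then [v]
    else (PySem.List.pyRange (last + 1) 10 1).foldl
      (fun res nxt => res ++ pvExtend f (v * 10 + nxt) nxt (d - 1)) []

def pvCands : List Int :=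
  (PySem.List.pyRange 1 10 1).flatMap (fun d => pvExtend 10 0 0 d)

def next_reading_alt (reading : Int) : Int :=
  let d := PySem.Str.len (PySem.Int.toStr reading)
  let start := (PySem.Int.ofStr? (PySem.Str.slice "123456789" none (some d))).getD 0
  if (PySem.Int.ofStr? (PySem.Str.slice "123456789" (some (-d)) none)).getD 0 ≤ reading then start
  else ((pvCands.find? (fun c => decide (reading < c))).getD start)

-- ===== PRECONDITION & SPEC =====
-- Pre_ excludes negative readings: they are outside an odometer's natural domain, and A's
-- value there (reading + 1, accepted because its digit check passes any number below 10) is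
-- an accident of its increment loop, not odometer behaviour.
def Pre_next_reading (reading : Int) : Prop := 0 ≤ reading
instance (reading : Int) : Decidable (Pre_next_reading reading) := by unfold Pre_next_reading; infer_instance
def pvWitness_next_reading : Int := 15

def Spec_next_reading (reading : Int) (out : Int) : Prop := out = next_reading_alt reading
instance (reading : Int) (out : Int) : Decidable (Spec_next_reading reading out) := by unfold Spec_next_reading; infer_instance

-- ===== CLAIM (what is proved, stated in full; the proofs are below) =====
def Claim_equal_next_reading : Prop := ∀ (reading : Int), Dom_next_reading reading → Pre_next_reading reading → Spec_next_reading reading (next_reading reading)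

-- ===== LEMMAS AND PROOFS =====

-- ---- is_valid: one-step unfolding ----

theorem pvIsValidGo_step (f : Nat) (n : Int) (h : 0 < f) :
    pvIsValidGo f n =
      if n < 10 then true
      else if PySem.Int.mod (PySem.Int.floordiv n 10) 10 < PySem.Int.mod n 10 then
        pvIsValidGo (f - 1) (PySem.Int.floordiv n 10)
      else false := by
  cases f with
  | zero => omega
  | succ f => rfl

theorem pvIsValidGo_congr : ∀ (f g : Nat) (n : Int), n.natAbs < f → n.natAbs < g →
    pvIsValidGo f n = pvIsValidGo g n := by
  intro f
  induction f with
  | zero => intro g n h _; omega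
  | succ f ih =>
    intro g n hf hg
    rw [pvIsValidGo_step (f + 1) n (by omega), pvIsValidGo_step g n (by omega)]
    by_cases h10 : n < 10
    · rw [if_pos h10, if_pos h10]
    · rw [if_neg h10, if_neg h10]
      by_cases hc : PySem.Int.mod (PySem.Int.floordiv n 10) 10 < PySem.Int.mod n 10
      · rw [if_pos hc, if_pos hc]
        have hd : PySem.Int.floordiv n 10 = n / 10 :=
          PySem.Int.floordiv_eq_ediv_of_pos (by norm_num)
        have hlt : (PySem.Int.floordiv n 10).natAbs < n.natAbs := by rw [hd]; omega
        exact ih (g - 1) _ (by omega) (by omega)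
      · rw [if_neg hc, if_neg hc]

theorem pvIsValid_eq (n : Int) :
    is_valid n =
      if n < 10 then true
      else if PySem.Int.mod (PySem.Int.floordiv n 10) 10 < PySem.Int.mod n 10 then
        is_valid (PySem.Int.floordiv n 10)
      else false := by
  rw [is_valid, pvIsValidGo_step _ _ (by omega)]
  by_cases h10 : n < 10
  · rw [if_pos h10, if_pos h10]
  · rw [if_neg h10, if_neg h10]
    by_cases hc : PySem.Int.mod (PySem.Int.floordiv n 10) 10 < PySem.Int.mod n 10
    · rw [if_pos hc, if_pos hc]
      have hd : PySem.Int.floordiv n 10 = n / 10 :=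
        PySem.Int.floordiv_eq_ediv_of_pos (by norm_num)
      exact pvIsValidGo_congr _ _ _ (by rw [hd]; omega) (by omega)
    · rw [if_neg hc, if_neg hc]

-- ---- last-digit arithmetic ----

theorem pvMod10 (v e : Int) (h0 : 0 ≤ e) (h9 : e < 10) :
    PySem.Int.mod (v * 10 + e) 10 = e := by
  rw [PySem.Int.mod_eq_emod_of_pos (by norm_num)]; omega

theorem pvDiv10 (v e : Int) (h0 : 0 ≤ e) (h9 : e < 10) :
    PySem.Int.floordiv (v * 10 + e) 10 = v := by
  rw [PySem.Int.floordiv_eq_ediv_of_pos (by norm_num)]; omega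

theorem pvValid_single (n : Int) (h : n < 10) : is_valid n = true := by
  rw [pvIsValid_eq, if_pos h]

theorem pvValid_append (v e : Int) (hv : 1 ≤ v) (hval : is_valid v = true)
    (hgt : PySem.Int.mod v 10 < e) (h9 : e < 10) : is_valid (v * 10 + e) = true := by
  have h0 : 0 ≤ e := le_trans (PySem.Int.mod_nonneg v (by norm_num)) (le_of_lt hgt)
  rw [pvIsValid_eq, if_neg (by omega : ¬ v * 10 + e < 10),
    pvDiv10 v e h0 h9, pvMod10 v e h0 h9, if_pos hgt]
  exact hval

theorem pvValid_unappend (n : Int) (h10 : ¬ n < 10) (hv : is_valid n = true) :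
    is_valid (PySem.Int.floordiv n 10) = true ∧
    PySem.Int.mod (PySem.Int.floordiv n 10) 10 < PySem.Int.mod n 10 := by
  rw [pvIsValid_eq, if_neg h10] at hv
  by_cases hc : PySem.Int.mod (PySem.Int.floordiv n 10) 10 < PySem.Int.mod n 10
  · rw [if_pos hc] at hv; exact ⟨hv, hc⟩
  · rw [if_neg hc] at hv; exact absurd hv (by simp)

-- ---- pvExtend: one-step unfolding ----

theorem pvExtend_step (f : Nat) (v last d : Int) (hf : 0 < f) :
    pvExtend f v last d =
      if d = 0 then [v]
      else (PySem.List.pyRange (last + 1) 10 1).flatMap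
        (fun nxt => pvExtend (f - 1) (v * 10 + nxt) nxt (d - 1)) := by
  cases f with
  | zero => omega
  | succ f =>
    by_cases hd : d = 0
    · simp only [pvExtend, if_pos hd]
    · simp only [pvExtend, if_neg hd, Nat.succ_sub_one]
      rw [PySem.List.foldl_append_eq_flatMap]
      simp

-- ---- soundness: every generated number is valid, with a last-digit lower bound ----

theorem pvExtend_sound : ∀ (j fuel : Nat) (v last : Int), j < fuel →
    ((1 ≤ v ∧ is_valid v = true ∧ PySem.Int.mod v 10 = last) ∨ (v = 0 ∧ last = 0)) →
    ∀ x ∈ pvExtend fuel v last (j : Int),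
      (1 ≤ x ∧ is_valid x = true ∧ last + (j : Int) ≤ PySem.Int.mod x 10) ∨
      (x = 0 ∧ j = 0 ∧ v = 0) := by
  intro j
  induction j with
  | zero =>
    intro fuel v last hf hinv x hx
    rw [pvExtend_step fuel v last _ (by omega), if_pos (by norm_num)] at hx
    rw [List.mem_singleton] at hx
    subst hx
    rcases hinv with ⟨h1, h2, h3⟩ | ⟨h1, h2⟩
    · left; exact ⟨h1, h2, by omega⟩
    · right; exact ⟨h1, rfl, h1⟩
  | succ j ih =>
    intro fuel v last hf hinv x hx
    have hlast0 : 0 ≤ last := by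
      rcases hinv with ⟨_, _, h3⟩ | ⟨_, h3⟩
      · rw [← h3]; exact PySem.Int.mod_nonneg v (by norm_num)
      · omega
    rw [pvExtend_step fuel v last _ (by omega),
      if_neg (by push_cast; omega : ¬ ((j + 1 : Nat) : Int) = 0)] at hx
    rw [List.mem_flatMap] at hx
    obtain ⟨nxt, hn, hx⟩ := hx
    rw [PySem.List.mem_pyRange_one] at hn
    have hcast : ((j + 1 : Nat) : Int) - 1 = (j : Nat) := by push_cast; ring
    rw [hcast] at hx
    have hinv' : (1 ≤ v * 10 + nxt ∧ is_valid (v * 10 + nxt) = true ∧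
        PySem.Int.mod (v * 10 + nxt) 10 = nxt) ∨ (v * 10 + nxt = 0 ∧ nxt = 0) := by
      left
      rcases hinv with ⟨h1, h2, h3⟩ | ⟨h1, h2⟩
      · exact ⟨by omega, pvValid_append v nxt h1 h2 (by omega) (by omega),
          pvMod10 v nxt (by omega) (by omega)⟩
      · subst h1
        refine ⟨by omega, ?_, pvMod10 0 nxt (by omega) (by omega)⟩
        exact pvValid_single _ (by omega)
    have hres := ih (fuel - 1) (v * 10 + nxt) nxt (by omega) hinv' x hx
    rcases hres with ⟨h1, h2, h3⟩ | ⟨_, _, hveq⟩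
    · left
      refine ⟨h1, h2, ?_⟩
      push_cast
      omega
    · exfalso
      rcases hinv with ⟨h1, _, _⟩ | ⟨h1, _⟩ <;> omega

theorem pvCands_sound : ∀ c ∈ pvCands, 1 ≤ c ∧ is_valid c = true := by
  intro c hc
  rw [pvCands, List.mem_flatMap] at hc
  obtain ⟨d, hd, hc⟩ := hc
  rw [PySem.List.mem_pyRange_one] at hd
  have hdj : ((d.toNat : Nat) : Int) = d := Int.toNat_of_nonneg (by omega)
  rw [← hdj] at hc
  have := pvExtend_sound d.toNat 10 0 0 (by omega) (Or.inr ⟨rfl, rfl⟩) c hc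
  rcases this with ⟨h1, h2, _⟩ | ⟨_, hj, _⟩
  · exact ⟨h1, h2⟩
  · omega

-- ---- extension: appending one bigger digit stays in the table (one level deeper) ----

theorem pvExtend_ext : ∀ (j fuel : Nat) (v last y : Int), j + 1 < fuel →
    ((PySem.Int.mod v 10 = last) ∨ (v = 0 ∧ last = 0)) →
    y ∈ pvExtend fuel v last (j : Int) →
    ∀ e : Int, PySem.Int.mod y 10 < e → e < 10 →
    y * 10 + e ∈ pvExtend fuel v last ((j : Int) + 1) := by
  intro j
  induction j with
  | zero =>
    intro fuel v last y hf hlast hy e he1 he2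
    rw [pvExtend_step fuel v last _ (by omega), if_pos (by norm_num)] at hy
    rw [List.mem_singleton] at hy
    subst hy
    have hlast' : PySem.Int.mod y 10 = last := by
      rcases hlast with h | ⟨h1, h2⟩
      · exact h
      · subst h1; subst h2; rfl
    rw [pvExtend_step fuel y last _ (by omega), if_neg (by norm_num)]
    rw [List.mem_flatMap]
    refine ⟨e, ?_, ?_⟩
    · rw [PySem.List.mem_pyRange_one]; omega
    · rw [pvExtend_step (fuel - 1) _ _ _ (by omega), if_pos (by norm_num)]
      simp
  | succ j ih =>
    intro fuel v last y hf hlast hy e he1 he2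
    rw [pvExtend_step fuel v last _ (by omega),
      if_neg (by push_cast; omega : ¬ ((j + 1 : Nat) : Int) = 0)] at hy
    rw [List.mem_flatMap] at hy
    obtain ⟨nxt, hn, hy⟩ := hy
    rw [PySem.List.mem_pyRange_one] at hn
    have hcast : ((j + 1 : Nat) : Int) - 1 = (j : Nat) := by push_cast; ring
    rw [hcast] at hy
    have hlast0 : 0 ≤ last := by
      rcases hlast with h | ⟨_, h2⟩
      · rw [← h]; exact PySem.Int.mod_nonneg v (by norm_num)
      · omega
    have hrec := ih (fuel - 1) (v * 10 + nxt) nxt y (by omega)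
      (Or.inl (pvMod10 v nxt (by omega) (by omega))) hy e he1 he2
    rw [pvExtend_step fuel v last _ (by omega),
      if_neg (by push_cast; omega : ¬ ((j + 1 : Nat) : Int) + 1 = 0)]
    rw [List.mem_flatMap]
    refine ⟨nxt, by rw [PySem.List.mem_pyRange_one]; omega, ?_⟩
    have hcast2 : ((j + 1 : Nat) : Int) + 1 - 1 = (j : Nat) + 1 := by push_cast; ring
    rw [hcast2]
    exact hrec

-- ---- completeness: every valid positive number is in the table ----

theorem pvValid_mem (n : Int) (h1 : 1 ≤ n) (hv : is_valid n = true) : n ∈ pvCands := by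
  by_cases hlt : n < 10
  · rw [pvCands, List.mem_flatMap]
    refine ⟨1, by rw [PySem.List.mem_pyRange_one]; omega, ?_⟩
    have h0 : (0 : Int) ∈ pvExtend 10 0 0 ((0 : Nat) : Int) := by
      rw [pvExtend_step 10 0 0 _ (by omega), if_pos (by norm_num)]
      simp
    have := pvExtend_ext 0 10 0 0 0 (by omega) (Or.inr ⟨rfl, rfl⟩) h0 n
      (by rw [show PySem.Int.mod 0 10 = 0 from rfl]; omega) (by omega)
    have heq : (0 : Int) * 10 + n = n := by ring
    rw [heq] at this
    exact this
  · have hun := pvValid_unappend n hlt hv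
    have hdiv : PySem.Int.floordiv n 10 = n / 10 :=
      PySem.Int.floordiv_eq_ediv_of_pos (by norm_num)
    have hm1 : 1 ≤ PySem.Int.floordiv n 10 := by rw [hdiv]; omega
    have hmem := pvValid_mem (PySem.Int.floordiv n 10) hm1 hun.1
    rw [pvCands, List.mem_flatMap] at hmem
    obtain ⟨d, hd, hmF⟩ := hmem
    rw [PySem.List.mem_pyRange_one] at hd
    have hdj : ((d.toNat : Nat) : Int) = d := Int.toNat_of_nonneg (by omega)
    rw [← hdj] at hmF
    have hmod0 : 0 ≤ PySem.Int.mod n 10 := PySem.Int.mod_nonneg n (by norm_num)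
    have hmod9 : PySem.Int.mod n 10 < 10 := PySem.Int.mod_lt n (by norm_num)
    -- the digit count of n // 10 is at most its last digit (pvExtend_sound), so d ≤ 8
    have hsound := pvExtend_sound d.toNat 10 0 0 (by omega) (Or.inr ⟨rfl, rfl⟩) _ hmF
    have hdle : (d.toNat : Int) ≤ PySem.Int.mod (PySem.Int.floordiv n 10) 10 := by
      rcases hsound with ⟨_, _, h3⟩ | ⟨_, hj, _⟩
      · omega
      · omega
    have hext := pvExtend_ext d.toNat 10 0 0 (PySem.Int.floordiv n 10)
      (by omega) (Or.inr ⟨rfl, rfl⟩) hmF (PySem.Int.mod n 10) hun.2 hmod9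
    have hid : PySem.Int.floordiv n 10 * 10 + PySem.Int.mod n 10 = n :=
      PySem.Int.floordiv_mul_add_mod n 10
    rw [hid] at hext
    rw [pvCands, List.mem_flatMap]
    exact ⟨(d.toNat : Int) + 1, by rw [PySem.List.mem_pyRange_one]; omega, hext⟩
termination_by n.toNat
decreasing_by
  rw [PySem.Int.floordiv_eq_ediv_of_pos (by norm_num : (0:Int) < 10)]
  omega

-- ---- order: the table is strictly increasing ----

theorem pvPairwise_flatMap {α β : Type} (l : List α) (g : α → List β) (R : β → β → Prop)
    (hinner : ∀ a ∈ l, (g a).Pairwise R)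
    (hcross : l.Pairwise (fun a b => ∀ x ∈ g a, ∀ y ∈ g b, R x y)) :
    (l.flatMap g).Pairwise R := by
  induction l with
  | nil => simp
  | cons a t ih =>
    rw [List.flatMap_cons, List.pairwise_append]
    rw [List.pairwise_cons] at hcross
    refine ⟨hinner a (List.mem_cons_self), ih (fun b hb => hinner b (List.mem_cons_of_mem a hb)) hcross.2, ?_⟩
    intro x hx y hy
    rw [List.mem_flatMap] at hy
    obtain ⟨b, hb, hyb⟩ := hy
    exact hcross.1 b hb x hx y hyb

theorem pvExtend_bounds : ∀ (j fuel : Nat) (v last : Int), j < fuel → 0 ≤ last →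
    ∀ x ∈ pvExtend fuel v last (j : Int),
      v * (10:Int) ^ j ≤ x ∧ x < (v + 1) * (10:Int) ^ j ∧
      (1 ≤ j → (v * 10 + last + 1) * (10:Int) ^ (j - 1) ≤ x) := by
  intro j
  induction j with
  | zero =>
    intro fuel v last hf _ x hx
    rw [pvExtend_step fuel v last _ (by omega), if_pos (by norm_num)] at hx
    rw [List.mem_singleton] at hx
    subst hx
    simp
  | succ j ih =>
    intro fuel v last hf hlast0 x hx
    rw [pvExtend_step fuel v last _ (by omega),
      if_neg (by push_cast; omega : ¬ ((j + 1 : Nat) : Int) = 0)] at hx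
    rw [List.mem_flatMap] at hx
    obtain ⟨nxt, hn, hx⟩ := hx
    rw [PySem.List.mem_pyRange_one] at hn
    have hcast : ((j + 1 : Nat) : Int) - 1 = (j : Nat) := by push_cast; ring
    rw [hcast] at hx
    obtain ⟨hlo, hhi, _⟩ := ih (fuel - 1) (v * 10 + nxt) nxt (by omega) (by omega) x hx
    have hp : (0:Int) < 10 ^ j := by positivity
    have hpow : (10:Int) ^ (j + 1) = 10 ^ j * 10 := pow_succ 10 j
    refine ⟨?_, ?_, ?_⟩
    · have e1 : v * (10:Int) ^ (j + 1) = v * 10 * 10 ^ j := by ring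
      have h2 : v * 10 * 10 ^ j ≤ (v * 10 + nxt) * 10 ^ j := by nlinarith
      rw [e1]
      exact le_trans h2 hlo
    · have e2 : (v + 1) * (10:Int) ^ (j + 1) = (v * 10 + 10) * 10 ^ j := by ring
      have h3 : (v * 10 + nxt + 1) * 10 ^ j ≤ (v * 10 + 10) * 10 ^ j := by nlinarith
      rw [e2]
      exact lt_of_lt_of_le hhi h3
    · intro _
      have hstep : (v * 10 + last + 1) * 10 ^ j ≤ (v * 10 + nxt) * 10 ^ j := by nlinarith
      have hcast2 : (j + 1) - 1 = j := by omega
      rw [hcast2]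
      exact le_trans hstep hlo

theorem pvExtend_pairwise : ∀ (j fuel : Nat) (v last : Int), j < fuel → 0 ≤ last →
    (pvExtend fuel v last (j : Int)).Pairwise (· < ·) := by
  intro j
  induction j with
  | zero =>
    intro fuel v last hf _
    rw [pvExtend_step fuel v last _ (by omega), if_pos (by norm_num)]
    simp
  | succ j ih =>
    intro fuel v last hf hlast0
    rw [pvExtend_step fuel v last _ (by omega),
      if_neg (by push_cast; omega : ¬ ((j + 1 : Nat) : Int) = 0)]
    have hcast : ((j + 1 : Nat) : Int) - 1 = (j : Nat) := by push_cast; ring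
    rw [hcast]
    apply pvPairwise_flatMap
    · intro nxt hn
      rw [PySem.List.mem_pyRange_one] at hn
      exact ih (fuel - 1) (v * 10 + nxt) nxt (by omega) (by omega)
    · have hpw := PySem.List.pairwise_lt_pyRange_one (a := last + 1) (b := 10)
      refine hpw.imp_of_mem ?_
      intro nxt nxt' hn hn' hlt x hx y hy
      rw [PySem.List.mem_pyRange_one] at hn hn'
      obtain ⟨_, hhi, _⟩ := pvExtend_bounds j (fuel - 1) (v * 10 + nxt) nxt (by omega) (by omega) x hx
      obtain ⟨hlo', _, _⟩ := pvExtend_bounds j (fuel - 1) (v * 10 + nxt') nxt' (by omega) (by omega) y hy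
      have hp : (0:Int) < 10 ^ j := by positivity
      have : (v * 10 + nxt + 1) * 10 ^ j ≤ (v * 10 + nxt') * 10 ^ j := by nlinarith
      omega

theorem pvCands_pairwise : pvCands.Pairwise (· ≤ ·) := by
  have h : pvCands.Pairwise (· < ·) := by
    rw [pvCands]
    apply pvPairwise_flatMap
    · intro d hd
      rw [PySem.List.mem_pyRange_one] at hd
      have hdj : ((d.toNat : Nat) : Int) = d := Int.toNat_of_nonneg (by omega)
      rw [← hdj]
      exact pvExtend_pairwise d.toNat 10 0 0 (by omega) le_rfl
    · have hpw := PySem.List.pairwise_lt_pyRange_one (a := 1) (b := 10)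
      refine hpw.imp_of_mem ?_
      intro d d' hd hd' hlt x hx y hy
      rw [PySem.List.mem_pyRange_one] at hd hd'
      have hdj : ((d.toNat : Nat) : Int) = d := Int.toNat_of_nonneg (by omega)
      have hdj' : ((d'.toNat : Nat) : Int) = d' := Int.toNat_of_nonneg (by omega)
      rw [← hdj] at hx
      rw [← hdj'] at hy
      obtain ⟨_, hhi, _⟩ := pvExtend_bounds d.toNat 10 0 0 (by omega) le_rfl x hx
      obtain ⟨_, _, hlo'⟩ := pvExtend_bounds d'.toNat 10 0 0 (by omega) le_rfl y hy
      have hlo'' := hlo' (by omega)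
      have hle : (10:Int) ^ d.toNat ≤ 10 ^ (d'.toNat - 1) :=
        pow_le_pow_right₀ (by norm_num) (by omega)
      have h1 : (0 + 1 : Int) * 10 ^ d.toNat = 10 ^ d.toNat := by ring
      have h2 : ((0:Int) * 10 + 0 + 1) * 10 ^ (d'.toNat - 1) = 10 ^ (d'.toNat - 1) := by ring
      rw [h1] at hhi
      rw [h2] at hlo''
      omega
  exact h.imp le_of_lt

-- ---- find? on a sorted table ----

theorem pvFind_congr {α : Type} (l : List α) (p q : α → Bool) (h : ∀ c ∈ l, p c = q c) :
    l.find? p = l.find? q := by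
  induction l with
  | nil => rfl
  | cons a t ih =>
    have hpa := h a (List.mem_cons_self)
    cases hqa : q a with
    | true =>
      rw [List.find?_cons_of_pos (by rw [hpa, hqa]), List.find?_cons_of_pos hqa]
    | false =>
      rw [List.find?_cons_of_neg (by simp [hpa, hqa]), List.find?_cons_of_neg (by simp [hqa])]
      exact ih (fun c hc => h c (List.mem_cons_of_mem a hc))

theorem pvFind_ge_mem (l : List Int) (hs : l.Pairwise (· ≤ ·)) (r : Int) (hr : r ∈ l) :
    l.find? (fun c => decide (r ≤ c)) = some r := by
  induction l with
  | nil => cases hr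
  | cons a t ih =>
    rcases List.pairwise_cons.mp hs with ⟨ha, ht⟩
    by_cases hle : r ≤ a
    · have heq : a = r := by
        rcases List.mem_cons.mp hr with h | h
        · omega
        · have := ha r h; omega
      rw [List.find?_cons_of_pos (by simpa using hle), heq]
    · have hr' : r ∈ t := by
        rcases List.mem_cons.mp hr with h | h
        · exact absurd (le_of_eq h) hle
        · exact h
      rw [List.find?_cons_of_neg (by simpa using hle)]
      exact ih ht hr'

-- ---- A's while-loop computes the first table element ≥ the entry value ----

theorem pvLoop_step (start limit r : Int) (fuel : Nat) (h : 0 < fuel) :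
    pvLoopA start limit fuel r =
      if is_valid r then r
      else pvLoopA start limit (fuel - 1) (if limit < r + 1 then start else r + 1) := by
  cases fuel with
  | zero => omega
  | succ f => rfl

theorem pvLoop_eq (limit : Int) (hlim : limit ∈ pvCands) :
    ∀ (fuel : Nat) (start r : Int), 1 ≤ r → r ≤ limit → (limit - r).toNat < fuel →
    pvLoopA start limit fuel r = (pvCands.find? (fun c => decide (r ≤ c))).getD start := by
  intro fuel
  induction fuel with
  | zero => intro start r _ _ h3; omega
  | succ fuel ih =>
    intro start r h1 h2 h3
    by_cases hv : is_valid r = true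
    · rw [pvLoop_step _ _ _ _ (by omega), if_pos hv,
        pvFind_ge_mem pvCands pvCands_pairwise r (pvValid_mem r h1 hv)]
      rfl
    · have hnm : r ∉ pvCands := fun hm => hv (pvCands_sound r hm).2
      have hne : r ≠ limit := fun he => hnm (he ▸ hlim)
      have hlt : r < limit := lt_of_le_of_ne h2 hne
      rw [pvLoop_step _ _ _ _ (by omega), if_neg (by simpa using hv),
        if_neg (by omega : ¬ limit < r + 1)]
      have hrec := ih start (r + 1) (by omega) (by omega) (by omega)
      simp only [Nat.succ_sub_one]
      rw [hrec]
      congr 1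
      apply pvFind_congr
      intro c hc
      have hcr : c ≠ r := fun he => hnm (he ▸ hc)
      by_cases h : r ≤ c
      · rw [decide_eq_true (by omega : r + 1 ≤ c), decide_eq_true h]
      · rw [decide_eq_false (by omega : ¬ r + 1 ≤ c), decide_eq_false h]

-- ---- the largest valid numbers: pvRep e = 12…e ----

def pvRep : Nat → Int
  | 0 => 0
  | e + 1 => pvRep e * 10 + (e + 1)

theorem pvRep_facts : ∀ e < 10, ∀ e' < 10, e ≤ e' → pvRep e ≤ pvRep e' := by decide

theorem pvTop (n : Int) (h1 : 1 ≤ n) (hv : is_valid n = true) :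
    n ≤ pvRep (PySem.Int.mod n 10).toNat := by
  have hmod0 : 0 ≤ PySem.Int.mod n 10 := PySem.Int.mod_nonneg n (by norm_num)
  have hmod9 : PySem.Int.mod n 10 < 10 := PySem.Int.mod_lt n (by norm_num)
  by_cases hlt : n < 10
  · have hmn : PySem.Int.mod n 10 = n := by
      rw [PySem.Int.mod_eq_emod_of_pos (by norm_num)]; omega
    rw [hmn]
    have hstep : ∀ e : Nat, e < 10 → ((e : Int) ≤ pvRep e) := by decide
    have h := hstep n.toNat (by omega)
    omega
  · have hun := pvValid_unappend n hlt hv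
    have hdiv : PySem.Int.floordiv n 10 = n / 10 :=
      PySem.Int.floordiv_eq_ediv_of_pos (by norm_num)
    have hm1 : 1 ≤ PySem.Int.floordiv n 10 := by rw [hdiv]; omega
    have hrec := pvTop (PySem.Int.floordiv n 10) hm1 hun.1
    have hmod0' : 0 ≤ PySem.Int.mod (PySem.Int.floordiv n 10) 10 :=
      PySem.Int.mod_nonneg _ (by norm_num)
    have hmono := pvRep_facts (PySem.Int.mod (PySem.Int.floordiv n 10) 10).toNat (by omega)
      ((PySem.Int.mod n 10).toNat - 1) (by omega) (by omega)
    have hid : PySem.Int.floordiv n 10 * 10 + PySem.Int.mod n 10 = n :=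
      PySem.Int.floordiv_mul_add_mod n 10
    have hdd1 : 1 ≤ (PySem.Int.mod n 10).toNat := by omega
    obtain ⟨m, hm⟩ : ∃ m, (PySem.Int.mod n 10).toNat = m + 1 := ⟨_, (Nat.succ_pred_eq_of_pos hdd1).symm⟩
    rw [hm]
    show n ≤ pvRep m * 10 + (m + 1 : Nat)
    have hmcast : ((m + 1 : Nat) : Int) = PySem.Int.mod n 10 := by omega
    rw [hm] at hmono
    simp only [Nat.add_sub_cancel] at hmono
    push_cast
    omega
termination_by n.toNat
decreasing_by
  rw [PySem.Int.floordiv_eq_ediv_of_pos (by norm_num : (0:Int) < 10)]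
  omega

theorem pvTop' (n : Int) (h1 : 1 ≤ n) (hv : is_valid n = true) : n ≤ 123456789 := by
  have h := pvTop n h1 hv
  have hmod0 : 0 ≤ PySem.Int.mod n 10 := PySem.Int.mod_nonneg n (by norm_num)
  have hmod9 : PySem.Int.mod n 10 < 10 := PySem.Int.mod_lt n (by norm_num)
  have hmono := pvRep_facts (PySem.Int.mod n 10).toNat (by omega) 9 (by omega) (by omega)
  have h9 : pvRep 9 = 123456789 := by decide
  omega

def pvT : Nat → Int → Int
  | 0, _ => 0
  | k + 1, e => if e ≤ 0 then 0 else pvT k (e - 1) * 10 + e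

theorem pvT_nonneg : ∀ (k : Nat) (e : Int), 0 ≤ pvT k e := by
  intro k
  induction k with
  | zero => intro e; exact le_refl 0
  | succ k ih =>
    intro e
    show 0 ≤ if e ≤ 0 then 0 else pvT k (e - 1) * 10 + e
    by_cases he : e ≤ 0
    · rw [if_pos he]
    · rw [if_neg he]
      have := ih (e - 1)
      omega

theorem pvT_mono_e : ∀ (k : Nat) (e e' : Int), e ≤ e' → pvT k e ≤ pvT k e' := by
  intro k
  induction k with
  | zero => intro e e' _; exact le_refl 0
  | succ k ih =>
    intro e e' h
    show (if e ≤ 0 then 0 else pvT k (e - 1) * 10 + e) ≤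
      (if e' ≤ 0 then 0 else pvT k (e' - 1) * 10 + e')
    by_cases he : e ≤ 0
    · rw [if_pos he]
      by_cases he' : e' ≤ 0
      · rw [if_pos he']
      · rw [if_neg he']
        have h1 := pvT_nonneg k (e' - 1)
        omega
    · rw [if_neg he, if_neg (by omega : ¬ e' ≤ 0)]
      have h1 := ih (e - 1) (e' - 1) (by omega)
      omega

theorem pvT_step : ∀ (k : Nat) (e : Int), pvT k e ≤ pvT (k + 1) e := by
  intro k
  induction k with
  | zero => intro e; exact pvT_nonneg 1 e
  | succ k ih =>
    intro e
    show (if e ≤ 0 then 0 else pvT k (e - 1) * 10 + e) ≤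
      (if e ≤ 0 then 0 else pvT (k + 1) (e - 1) * 10 + e)
    by_cases he : e ≤ 0
    · rw [if_pos he, if_pos he]
    · rw [if_neg he, if_neg he]
      have h1 := ih (e - 1)
      omega

theorem pvT_mono_k (k k' : Nat) (h : k ≤ k') (e : Int) : pvT k e ≤ pvT k' e := by
  induction k' with
  | zero =>
    have hk : k = 0 := by omega
    subst hk
    exact le_refl _
  | succ k' ih =>
    by_cases hkk : k ≤ k'
    · exact le_trans (ih hkk) (pvT_step k' e)
    · have hk : k = k' + 1 := by omega
      subst hk
      exact le_refl _

-- the largest valid number below 10^k with last digit at most e is pvT k e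
theorem pvBound : ∀ (kk : Nat), 1 ≤ kk → ∀ c : Int, 1 ≤ c → is_valid c = true →
    c < (10:Int) ^ kk → ∀ e : Int, PySem.Int.mod c 10 ≤ e → c ≤ pvT kk e := by
  intro kk
  induction kk with
  | zero => intro h; omega
  | succ k ih =>
    intro _ c h1 hv hck e he
    have hmod0 : 0 ≤ PySem.Int.mod c 10 := PySem.Int.mod_nonneg c (by norm_num)
    have hmod9 : PySem.Int.mod c 10 < 10 := PySem.Int.mod_lt c (by norm_num)
    by_cases hc10 : c < 10
    · have hmc : PySem.Int.mod c 10 = c := by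
        rw [PySem.Int.mod_eq_emod_of_pos (by norm_num)]; omega
      have hT1 : pvT 1 e = if e ≤ 0 then 0 else e := by
        show (if e ≤ 0 then 0 else pvT 0 (e - 1) * 10 + e) = _
        by_cases he0 : e ≤ 0
        · rw [if_pos he0, if_pos he0]
        · rw [if_neg he0, if_neg he0]
          show (0:Int) * 10 + e = e
          ring
      have hle1 : c ≤ pvT 1 e := by
        rw [hT1]
        split_ifs <;> omega
      exact le_trans hle1 (pvT_mono_k 1 (k + 1) (by omega) e)
    · have hun := pvValid_unappend c hc10 hv
      have hdiv : PySem.Int.floordiv c 10 = c / 10 :=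
        PySem.Int.floordiv_eq_ediv_of_pos (by norm_num)
      have hm1 : 1 ≤ PySem.Int.floordiv c 10 := by rw [hdiv]; omega
      have hmodm0 : 0 ≤ PySem.Int.mod (PySem.Int.floordiv c 10) 10 :=
        PySem.Int.mod_nonneg _ (by norm_num)
      have hk1 : 1 ≤ k := by
        by_contra hcon
        have hk0 : k = 0 := by omega
        subst hk0
        rw [pow_one] at hck
        omega
      have hpow : (10:Int) ^ (k + 1) = 10 ^ k * 10 := pow_succ 10 k
      have hmlt : PySem.Int.floordiv c 10 < (10:Int) ^ k := by
        rw [hdiv]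
        omega
      have hrec := ih hk1 (PySem.Int.floordiv c 10) hm1 hun.1 hmlt
        (PySem.Int.mod c 10 - 1) (by omega)
      have hTmono := pvT_mono_e k (PySem.Int.mod c 10 - 1) (e - 1) (by omega)
      have hid : PySem.Int.floordiv c 10 * 10 + PySem.Int.mod c 10 = c :=
        PySem.Int.floordiv_mul_add_mod c 10
      have hTd : pvT (k + 1) (PySem.Int.mod c 10) =
          pvT k (PySem.Int.mod c 10 - 1) * 10 + PySem.Int.mod c 10 := by
        show (if PySem.Int.mod c 10 ≤ 0 then 0 else _) = _
        rw [if_neg (by omega : ¬ PySem.Int.mod c 10 ≤ 0)]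
      have hTe : pvT (k + 1) (PySem.Int.mod c 10) ≤ pvT (k + 1) e :=
        pvT_mono_e (k + 1) _ e he
      rw [hTd] at hTe
      omega

-- ---- the string-derived start/limit values ----

def pvStartE (d : Int) : Int :=
  (PySem.Int.ofStr? (PySem.Str.slice "123456789" none (some d))).getD 0
def pvLimitE (d : Int) : Int :=
  (PySem.Int.ofStr? (PySem.Str.slice "123456789" (some (-d)) none)).getD 0

theorem pvLimitE_val (k : Nat) (h1 : 1 ≤ k) (h9 : k ≤ 9) : pvLimitE (k : Int) = pvT k 9 := by
  interval_cases k <;> decide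

theorem pvLimitE_big (k : Nat) (h : 9 ≤ k) : pvLimitE (k : Int) = 123456789 := by
  have hs : PySem.Str.slice "123456789" (some (-(k : Int))) none = "123456789" := by
    rw [PySem.Str.slice]
    rw [PySem.Chars.slice_eq_listSlice]
    rw [PySem.List.slice_from_neg_natCast _ k (by omega)]
    have hlen : ("123456789".toList).length = 9 := by decide
    rw [hlen, show 9 - k = 0 from by omega, List.drop_zero]
    decide
  rw [pvLimitE, hs]
  decide

theorem pvStartE_big (k : Nat) (h : 9 ≤ k) : pvStartE (k : Int) = 123456789 := by
  have hs : PySem.Str.slice "123456789" none (some (k : Int)) = "123456789" := by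
    rw [PySem.Str.slice]
    rw [PySem.Chars.slice_eq_listSlice]
    rw [PySem.List.slice_to _ (by omega : (0:Int) ≤ (k : Int))]
    have htn : (k : Int).toNat = k := by omega
    have hlen : ("123456789".toList).length = 9 := by decide
    rw [htn, List.take_of_length_le (by rw [hlen]; omega)]
    decide
  rw [pvStartE, hs]
  decide

theorem pvLimitE_facts (k : Nat) (h1 : 1 ≤ k) :
    1 ≤ pvLimitE (k : Int) ∧ is_valid (pvLimitE (k : Int)) = true ∧ 9 ≤ pvLimitE (k : Int) := by
  by_cases h9 : k ≤ 9
  · interval_cases k <;> exact ⟨by decide, by decide, by decide⟩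
  · rw [pvLimitE_big k (by omega)]
    exact ⟨by norm_num, by decide, by norm_num⟩

theorem pvStartE_facts (k : Nat) (h1 : 1 ≤ k) :
    1 ≤ pvStartE (k : Int) ∧ is_valid (pvStartE (k : Int)) = true := by
  by_cases h9 : k ≤ 9
  · interval_cases k <;> exact ⟨by decide, by decide⟩
  · rw [pvStartE_big k (by omega)]
    exact ⟨by norm_num, by decide⟩

-- ---- the entry value just past the limit is never valid ----

theorem pvPow_invalid (k : Nat) (hk : 1 ≤ k) : is_valid ((10:Int) ^ k) = false := by
  obtain ⟨m, hm⟩ : ∃ m, k = m + 1 := ⟨k - 1, by omega⟩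
  subst hm
  have hpow : (10:Int) ^ (m + 1) = 10 ^ m * 10 + 0 := by rw [pow_succ]; ring
  have hp : (1:Int) ≤ 10 ^ m := one_le_pow₀ (by norm_num)
  rw [pvIsValid_eq, if_neg (by omega : ¬ (10:Int) ^ (m + 1) < 10)]
  rw [hpow, pvMod10 _ 0 (by omega) (by omega)]
  rw [if_neg]
  exact not_lt.mpr (PySem.Int.mod_nonneg _ (by norm_num))

theorem pvEntry_invalid (k : Nat) (hk : 1 ≤ k) (reading : Int) (h0 : 0 ≤ reading)
    (hub : reading < (10:Int) ^ k) (hgt : pvLimitE (k : Int) < reading) :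
    is_valid (reading + 1) = false := by
  by_cases hv : is_valid (reading + 1) = true
  · exfalso
    by_cases h9 : k ≤ 9
    · rw [pvLimitE_val k hk h9] at hgt
      by_cases hlt : reading + 1 < (10:Int) ^ k
      · have hmod9 : PySem.Int.mod (reading + 1) 10 < 10 :=
          PySem.Int.mod_lt (reading + 1) (by norm_num)
        have := pvBound k hk (reading + 1) (by omega) hv hlt 9 (by omega)
        omega
      · have heq : reading + 1 = (10:Int) ^ k := by omega
        have hpi := pvPow_invalid k hk
        rw [← heq] at hpi
        rw [hv] at hpi
        simp at hpi
    · have hlim := pvLimitE_big k (by omega)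
      have := pvTop' (reading + 1) (by omega) hv
      omega
  · exact Bool.not_eq_true _ |>.mp hv

-- ---- the length of str(n) bounds n ----

theorem pvUB_aux : ∀ (fuel n : Nat), n < fuel → n < 10 ^ (Nat.toDigitsCore 10 fuel n []).length := by
  intro fuel
  induction fuel with
  | zero => omega
  | succ f ih =>
    intro n h
    rw [Nat.toDigitsCore]
    by_cases h0 : n / 10 = 0
    · simp only [h0, if_true]
      rw [List.length_cons, List.length_nil, pow_one]
      omega
    · simp only [h0, if_false]
      rw [Nat.toDigitsCore_lens_eq]
      have hrec := ih (n / 10) (by omega)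
      rw [pow_succ]
      omega

theorem pvUB (n : Int) (h : 0 ≤ n) : n < (10:Int) ^ (PySem.Int.toChars n).length := by
  rw [PySem.Int.toChars, if_neg (by omega : ¬ n < 0)]
  rw [Nat.toDigits]
  have hrec := pvUB_aux (n.toNat + 1) n.toNat (by omega)
  have h1 : n = (n.toNat : Int) := by omega
  rw [h1]
  exact_mod_cast hrec

theorem pvSize_pos (n : Int) : 1 ≤ (PySem.Int.toChars n).length := by
  by_cases hneg : n < 0
  · rw [PySem.Int.toChars, if_pos hneg]
    simp
  · by_contra hl
    have h0 : (PySem.Int.toChars n).length = 0 := by omega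
    have hub := pvUB n (by omega)
    rw [h0, pow_zero] at hub
    have hn0 : n = 0 := by omega
    subst hn0
    have : PySem.Int.toChars 0 = ['0'] := by decide
    rw [this] at h0
    simp at h0

-- ---- assembling the two programs ----

theorem pvMain_core (reading S L : Int) (h0 : 0 ≤ reading)
    (hSv : 1 ≤ S ∧ is_valid S = true) (hLv : 1 ≤ L ∧ is_valid L = true)
    (hinv : L < reading → is_valid (reading + 1) = false) :
    (if reading = L then S
     else pvLoopA S L ((L - reading).toNat + (L - S).toNat + 3) (reading + 1)) =
    (if L ≤ reading then S
     else (pvCands.find? (fun c => decide (reading < c))).getD S) := by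
  have hLmem : L ∈ pvCands := pvValid_mem L hLv.1 hLv.2
  by_cases heq : reading = L
  · rw [if_pos heq, if_pos (by omega)]
  · rw [if_neg heq]
    by_cases hgt : L < reading
    · rw [if_pos (by omega)]
      rw [pvLoop_step _ _ _ _ (by omega), if_neg (by simp [hinv hgt])]
      rw [if_pos (by omega : L < reading + 1 + 1)]
      rw [pvLoop_step _ _ _ _ (by omega), if_pos hSv.2]
    · rw [if_neg (by omega : ¬ L ≤ reading)]
      rw [pvLoop_eq L hLmem _ S (reading + 1) (by omega) (by omega) (by omega)]
      have hfc : List.find? (fun c => decide (reading + 1 ≤ c)) pvCands =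
          List.find? (fun c => decide (reading < c)) pvCands := by
        apply pvFind_congr
        intro c hc
        by_cases h : reading < c
        · rw [decide_eq_true (by omega : reading + 1 ≤ c), decide_eq_true h]
        · rw [decide_eq_false (by omega : ¬ reading + 1 ≤ c), decide_eq_false h]
      rw [hfc]

theorem pvMain (reading : Int) (h0 : 0 ≤ reading) :
    next_reading reading = next_reading_alt reading := by
  have hsize : PySem.Str.len (PySem.Int.toStr reading) = ((PySem.Int.toChars reading).length : Int) := by
    rw [PySem.Str.len_eq, PySem.Int.toList_toStr]
  set k : Nat := (PySem.Int.toChars reading).length with hk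
  have hk1 : 1 ≤ k := pvSize_pos reading
  have hS := pvStartE_facts k hk1
  have hL := pvLimitE_facts k hk1
  have hinv : pvLimitE (k : Int) < reading → is_valid (reading + 1) = false := by
    intro hgt
    exact pvEntry_invalid k hk1 reading h0 (pvUB reading h0) hgt
  have hcore := pvMain_core reading (pvStartE (k : Int)) (pvLimitE (k : Int))
    h0 hS ⟨hL.1, hL.2.1⟩ hinv
  simp only [next_reading, next_reading_alt, get_limits, hsize]
  exact hcore

-- ===== VERDICT (by name: the statement is the Claim_ definition above) =====
theorem next_reading_spec : Claim_equal_next_reading := by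
  intro reading _ hpre
  unfold Spec_next_reading
  exact pvMain reading hpre
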